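-- pv_equiv track=rewrite | github.com/elias-aouad/music-summarization | code.py | get_streaks
-- ===== SOURCE A (Python) =====
-- def get_streaks(states, state_i):
--     already_in_streak = False
--     streak = {}
--     idx = None
--     for i in range(len(states)):
--         if states[i] == state_i:
--             if already_in_streak:
--                 streak[idx] += 1
--             else:
--                 already_in_streak = True
--                 idx = i
--                 streak[idx] = 1
--         else:
--             already_in_streak = False
--     return streak
-- ===== SOURCE B (Python) =====
-- def get_streaks(states, state_i):
--     # run-skipping scan: at each run start, measure the whole run with an inner
--     # scan and insert its final length once (no incremental dict counting)
--     streak = {}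
--     n = len(states)
--     i = 0
--     while i < n:
--         if states[i] == state_i:
--             j = i + 1
--             while j < n and states[j] == state_i:
--                 j += 1
--             streak[i] = j - i
--             i = j
--         else:
--             i += 1
--     return streak
-- ===== Notes on version B (the rewrite author's own statement) =====
-- stated objective: alternative
-- what changed: Replaces A's element-by-element flag-driven pass with incremental dict counter updates by a run-skipping two-level scan: at each run start an inner scan measures the whole run and its final length is inserted once.
import Mathlib
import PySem

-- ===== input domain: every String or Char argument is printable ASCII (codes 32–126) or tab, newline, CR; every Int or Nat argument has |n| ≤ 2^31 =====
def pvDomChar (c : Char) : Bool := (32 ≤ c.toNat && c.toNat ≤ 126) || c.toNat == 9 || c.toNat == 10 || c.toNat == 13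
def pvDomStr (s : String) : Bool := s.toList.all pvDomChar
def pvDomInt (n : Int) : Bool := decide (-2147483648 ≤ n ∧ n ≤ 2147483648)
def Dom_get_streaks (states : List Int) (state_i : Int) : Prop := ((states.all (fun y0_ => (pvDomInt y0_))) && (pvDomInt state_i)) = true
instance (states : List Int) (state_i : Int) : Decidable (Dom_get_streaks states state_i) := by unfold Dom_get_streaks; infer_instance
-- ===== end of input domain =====

-- B replaces A's flag-driven per-element pass (incremental dict counter updates) with a
-- run-skipping two-level scan that measures each run wholly and inserts its length once.


-- ===== PORT A =====
-- loop state: (already_in_streak, idx, streak); streak[idx] += 1 is a modify at the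
-- (always present) key idx — the `none` arm of the match is unreachable.
def get_streaks_step (state_i : Int) (st : Bool × Option Int × PySem.Dict Int Int) (i : Int) (x : Int) :
    Bool × Option Int × PySem.Dict Int Int :=
  if x == state_i then
    if st.1 then
      (true, st.2.1, (match st.2.1 with
        | some j => st.2.2.modify j 0 (· + 1)
        | none => st.2.2))
    else
      (true, some i, st.2.2.insert i 1)
  else
    (false, st.2.1, st.2.2)

def get_streaks (states : List Int) (state_i : Int) : List (Int × Int) :=
  ((PySem.List.pyRange 0 (PySem.List.len states) 1).foldl
    (fun st i => get_streaks_step state_i st i (PySem.List.pyGetD states i 0))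
    (false, none, PySem.Dict.empty)).2.2.items

-- ===== PORT B =====
-- the inner `while j < n and states[j] == state_i: j += 1` loop of Source B
def get_streaks_alt_inner (states : List Int) (state_i n j : Int) : Int :=
  if j < n ∧ PySem.List.pyGetD states j 0 == state_i then
    get_streaks_alt_inner states state_i n (j + 1)
  else j
termination_by (n - j).toNat
decreasing_by omega

-- the inner scan never moves backwards (needed for the outer loop's termination)
theorem get_streaks_alt_inner_ge (states : List Int) (state_i n j : Int) :
    j ≤ get_streaks_alt_inner states state_i n j := by
  rw [get_streaks_alt_inner]
  split
  · exact le_trans (by omega) (get_streaks_alt_inner_ge states state_i n (j + 1))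
  · exact le_refl j
termination_by (n - j).toNat
decreasing_by omega

-- the outer `while i < n` loop of Source B
def get_streaks_alt_outer (states : List Int) (state_i n i : Int) (d : PySem.Dict Int Int) :
    PySem.Dict Int Int :=
  if h : i < n then
    if PySem.List.pyGetD states i 0 == state_i then
      let j := get_streaks_alt_inner states state_i n (i + 1)
      get_streaks_alt_outer states state_i n j (d.insert i (j - i))
    else
      get_streaks_alt_outer states state_i n (i + 1) d
  else d
termination_by (n - i).toNat
decreasing_by
  · have := get_streaks_alt_inner_ge states state_i n (i + 1); omega
  · omega

def get_streaks_alt (states : List Int) (state_i : Int) : List (Int × Int) :=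
  (get_streaks_alt_outer states state_i (PySem.List.len states) 0 PySem.Dict.empty).items

-- ===== PRECONDITION & SPEC =====
def Spec_get_streaks (states : List Int) (state_i : Int) (out : List (Int × Int)) : Prop := out = get_streaks_alt states state_i
instance (states : List Int) (state_i : Int) (out : List (Int × Int)) : Decidable (Spec_get_streaks states state_i out) := by unfold Spec_get_streaks; infer_instance

-- ===== CLAIM (what is proved, stated in full; the proofs are below) =====
def Claim_equal_get_streaks : Prop := ∀ (states : List Int) (state_i : Int), Dom_get_streaks states state_i → Spec_get_streaks states state_i (get_streaks states state_i)

-- ===== LEMMAS AND PROOFS =====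

-- Python indexing with a nonnegative in-range Int index is plain list indexing
theorem pyGetD_of_toNat_lt (states : List Int) (j : Int) (h0 : 0 ≤ j) (h : j.toNat < states.length) :
    PySem.List.pyGetD states j 0 = states[j.toNat] := by
  obtain ⟨n, rfl⟩ : ∃ n : Nat, j = (n : Int) := ⟨j.toNat, by omega⟩
  rw [PySem.List.pyGetD_natCast]
  simp [List.getD_eq_getElem?_getD, List.getElem?_eq_getElem (by simpa using h)]
  rfl

-- modifying the key just inserted bumps its value in place
theorem dict_modify_insert_self (d : PySem.Dict Int Int) (k v : Int) :
    (d.insert k v).modify k 0 (· + 1) = d.insert k (v + 1) := by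
  unfold PySem.Dict.modify
  rw [PySem.Dict.getD_insert_self, PySem.Dict.insert_insert_self]

-- the inner scan computes start + length of the run of matches in the suffix
theorem alt_inner_spec (states : List Int) (state_i j : Int) (hj : 0 ≤ j) :
    get_streaks_alt_inner states state_i (PySem.List.len states) j =
      j + ((states.drop j.toNat).takeWhile (fun y => y == state_i)).length := by
  rw [get_streaks_alt_inner]
  by_cases h : j < PySem.List.len states ∧ PySem.List.pyGetD states j 0 == state_i
  · rw [if_pos h]
    have hlt : j.toNat < states.length := by
      have := h.1; simp [PySem.List.len] at this; omega
    have hdrop : states.drop j.toNat = states[j.toNat] :: states.drop (j.toNat + 1) :=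
      List.drop_eq_getElem_cons hlt
    have hget : PySem.List.pyGetD states j 0 = states[j.toNat] :=
      pyGetD_of_toNat_lt states j (by omega) hlt
    have hbeq : (states[j.toNat] == state_i) = true := by rw [← hget]; exact h.2
    rw [alt_inner_spec states state_i (j + 1) (by omega)]
    have h1 : (j + 1).toNat = j.toNat + 1 := by omega
    rw [hdrop, List.takeWhile_cons, hbeq, h1]
    simp only [if_true, List.length_cons]
    push_cast
    ring
  · rw [if_neg h]
    rcases not_and_or.mp h with h1 | h2
    · have : states.length ≤ j.toNat := by
        simp [PySem.List.len] at h1; omega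
      rw [List.drop_eq_nil_of_le this]
      simp
    · have hb : (PySem.List.pyGetD states j 0 == state_i) = false := by
        simpa using h2
      by_cases hlt : j.toNat < states.length
      · have hdrop : states.drop j.toNat = states[j.toNat] :: states.drop (j.toNat + 1) :=
          List.drop_eq_getElem_cons hlt
        have hget : PySem.List.pyGetD states j 0 = states[j.toNat] :=
          pyGetD_of_toNat_lt states j (by omega) hlt
        rw [hdrop, List.takeWhile_cons, ← hget, hb]
        simp
      · rw [List.drop_eq_nil_of_le (by omega)]
        simp
termination_by (PySem.List.len states - j).toNat
decreasing_by simp [PySem.List.len] at *; omega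

-- A's fold absorbs a whole run of matches into the counter of the open streak
theorem foldA_run (state_i : Int) (tw : List Int) (h : ∀ y ∈ tw, (y == state_i) = true) :
    ∀ (rz : List Int) (t st m : Int) (d : PySem.Dict Int Int),
    (PySem.List.enumerate (tw ++ rz) t).foldl
        (fun s p => get_streaks_step state_i s p.1 p.2) (true, some st, d.insert st m) =
    (PySem.List.enumerate rz (t + tw.length)).foldl
        (fun s p => get_streaks_step state_i s p.1 p.2) (true, some st, d.insert st (m + tw.length)) := by
  induction tw with
  | nil => intro rz t st m d; simp
  | cons y tw' ih =>
    intro rz t st m d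
    have hy : (y == state_i) = true := h y (by simp)
    have hstep : get_streaks_step state_i (true, some st, d.insert st m) t y =
        (true, some st, d.insert st (m + 1)) := by
      simp [get_streaks_step, hy, dict_modify_insert_self]
    rw [List.cons_append, PySem.List.enumerate_cons, List.foldl_cons]
    simp only [hstep]
    rw [ih (fun y hy' => h y (by simp [hy'])) rz (t + 1) st (m + 1) d]
    have e1 : t + 1 + (tw'.length : Int) = t + ((tw'.length : Int) + 1) := by ring
    have e2 : m + 1 + (tw'.length : Int) = m + ((tw'.length : Int) + 1) := by ring
    simp only [List.length_cons]
    push_cast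
    rw [e1, e2]

-- main invariant: from any closed-streak state, the dict A's fold computes over the
-- suffix starting at index i equals B's outer loop started at i
theorem main_eq (states : List Int) (state_i : Int) :
    ∀ (i : Int) (idx : Option Int) (d : PySem.Dict Int Int), 0 ≤ i →
    ((PySem.List.enumerate (states.drop i.toNat) i).foldl
        (fun s p => get_streaks_step state_i s p.1 p.2) (false, idx, d)).2.2 =
    get_streaks_alt_outer states state_i (PySem.List.len states) i d := by
  intro i idx d hi
  rw [get_streaks_alt_outer]
  by_cases hin : i < PySem.List.len states
  · have hlt : i.toNat < states.length := by simp [PySem.List.len] at hin; omega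
    have hdrop : states.drop i.toNat = states[i.toNat] :: states.drop (i.toNat + 1) :=
      List.drop_eq_getElem_cons hlt
    have hget : PySem.List.pyGetD states i 0 = states[i.toNat] :=
      pyGetD_of_toNat_lt states i hi hlt
    rw [dif_pos hin]
    by_cases hx : (states[i.toNat] == state_i) = true
    · -- run starts at i
      rw [hget, if_pos hx]
      set rest := states.drop (i.toNat + 1) with hrest
      have hsplit : rest = rest.takeWhile (fun y => y == state_i) ++
          rest.dropWhile (fun y => y == state_i) := (List.takeWhile_append_dropWhile).symm
      set tw := rest.takeWhile (fun y => y == state_i) with htw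
      set rz := rest.dropWhile (fun y => y == state_i) with hrz
      have hinner : get_streaks_alt_inner states state_i (PySem.List.len states) (i + 1) =
          i + 1 + tw.length := by
        rw [alt_inner_spec states state_i (i + 1) (by omega)]
        have h1 : (i + 1).toNat = i.toNat + 1 := by omega
        rw [h1]
      set j : Int := i + 1 + tw.length with hj
      have hstep1 : get_streaks_step state_i (false, idx, d) i states[i.toNat] =
          (true, some i, d.insert i 1) := by
        simp [get_streaks_step, hx]
      have hrzdrop : states.drop j.toNat = rz := by
        have hjt : j.toNat = (i.toNat + 1) + tw.length := by omega
        rw [hjt, ← List.drop_drop, ← hrest, hsplit]  -- (drop (i+1)).drop tw.length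
        simp
      rw [hdrop, PySem.List.enumerate_cons, List.foldl_cons]
      simp only [hstep1]
      rw [hinner]
      conv_lhs => rw [hsplit]
      rw [foldA_run state_i tw (fun y hy => by rw [htw] at hy; exact List.mem_takeWhile_imp (p := fun a => a == state_i) (l := rest) hy) rz (i + 1) i 1 d]
      have hins : d.insert i (j - i) = d.insert i (1 + (tw.length : Int)) := by
        rw [hj]; ring_nf
      rw [← hj, hins]
      cases hcase : rz with
      | nil =>
        rw [hcase] at hrzdrop
        have hjn : ¬ j < PySem.List.len states := by
          have := List.drop_eq_nil_iff.mp hrzdrop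
          simp [PySem.List.len]; omega
        simp only [PySem.List.enumerate_nil, List.foldl_nil]
        rw [get_streaks_alt_outer, dif_neg hjn]
      | cons z rz' =>
        rw [hcase] at hrzdrop
        have hz : (z == state_i) = false := by
          have := List.head_dropWhile_not (p := fun y => y == state_i) (l := rest)
          rw [← hrz, hcase] at this
          simpa using this (by simp)
        have hjlt : j.toNat < states.length := by
          by_contra hge
          rw [List.drop_eq_nil_of_le (by omega)] at hrzdrop
          simp at hrzdrop
        have hjn : j < PySem.List.len states := by simp [PySem.List.len]; omega
        have hgetj : PySem.List.pyGetD states j 0 = z := by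
          rw [pyGetD_of_toNat_lt states j (by omega) hjlt]
          have h3 := List.drop_eq_getElem_cons hjlt
          rw [hrzdrop] at h3
          exact ((List.cons.injEq _ _ _ _).mp h3).1.symm
        have hstep2 : get_streaks_step state_i (true, some i, d.insert i (1 + (tw.length:Int))) j z =
            (false, some i, d.insert i (1 + (tw.length:Int))) := by
          simp [get_streaks_step, hz]
        simp only [PySem.List.enumerate_cons, List.foldl_cons, hstep2]
        have hrz' : states.drop (j + 1).toNat = rz' := by
          have h1 : (j + 1).toNat = j.toNat + 1 := by omega
          rw [h1, ← List.drop_drop, hrzdrop]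
          simp
        have hrec := main_eq states state_i (j + 1) (some i) (d.insert i (1 + (tw.length:Int))) (by omega)
        rw [hrz'] at hrec
        rw [hrec]
        conv_rhs => rw [get_streaks_alt_outer]
        rw [dif_pos hjn, hgetj, if_neg (by simp [hz])]
    · -- mismatch at i
      have hxf : (states[i.toNat] == state_i) = false := by simpa using hx
      rw [hget, if_neg (by simp [hxf])]
      have hstep : get_streaks_step state_i (false, idx, d) i states[i.toNat] =
          (false, idx, d) := by
        simp [get_streaks_step, hxf]
      rw [hdrop, PySem.List.enumerate_cons, List.foldl_cons]
      simp only [hstep]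
      have h1 : (i + 1).toNat = i.toNat + 1 := by omega
      have := main_eq states state_i (i + 1) idx d (by omega)
      rw [h1] at this
      exact this
  · rw [dif_neg hin]
    have : states.length ≤ i.toNat := by simp [PySem.List.len] at hin; omega
    rw [List.drop_eq_nil_of_le this]
    simp
termination_by i => (states.length - i.toNat)
decreasing_by
  · omega
  · omega

-- ===== VERDICT (by name: the statement is the Claim_ definition above) =====
theorem get_streaks_spec : Claim_equal_get_streaks := by
  intro states state_i _
  show get_streaks states state_i = get_streaks_alt states state_i
  simp only [get_streaks, get_streaks_alt]
  have hA : (PySem.List.pyRange 0 (PySem.List.len states) 1).foldl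
      (fun st i => get_streaks_step state_i st i (PySem.List.pyGetD states i 0))
      (false, none, PySem.Dict.empty) =
      (PySem.List.enumerate states 0).foldl
      (fun st p => get_streaks_step state_i st p.1 p.2)
      (false, none, PySem.Dict.empty) := by
    rw [PySem.List.enumerate_eq_map_pyRange states 0, List.foldl_map]
  rw [hA]
  have := main_eq states state_i 0 none PySem.Dict.empty (by omega)
  simp only [Int.toNat_zero, List.drop_zero] at this
  rw [this]
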